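-- pv_equiv track=rewrite | github.com/harmslab/epistasis | epistasis/utils.py | genotype_params
-- ===== SOURCE A (Python) =====
-- import itertools as it
--
-- def genotype_params(genotype, order=None):
--     """ List the possible parameters (as label form) for a binary genotype
--         up to a given order.
--     """
--     if order is None:
--         order = len(genotype)
--
--     length = len(genotype)
--
--     mutations = [i + 1 for i in range(length) if genotype[i] == "1"]
--     params = [[0]]
--     for o in range(1, order+1):
--         params += [list(z) for z in it.combinations(mutations, o)]
--
--     return params
-- ===== SOURCE B (Python) =====
-- def _expand(c, rest):
--     # extend combination c by each element of rest, keeping only later elements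
--     return [(c + [x], rest[j + 1:]) for j, x in enumerate(rest)]
--
--
-- def genotype_params(genotype, order=None):
--     """ List the possible parameters (as label form) for a binary genotype
--         up to a given order.  BFS layer-by-layer over (combination, remaining)
--         pairs instead of one itertools.combinations query per order.
--     """
--     if order is None:
--         order = len(genotype)
--
--     mutations = [i + 1 for i in range(len(genotype)) if genotype[i] == "1"]
--
--     params = [[0]]
--     layer = _expand([], mutations)
--     o = 1
--     while o <= order and layer:
--         params += [c for c, _ in layer]
--         layer = [p for c, rest in layer for p in _expand(c, rest)]
--         o += 1
--     return params
-- ===== Notes on version B (the rewrite author's own statement) =====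
-- stated objective: faster
-- what changed: Replaced the per-size itertools.combinations queries with a single BFS that extends a layer of (combination, remaining-elements) pairs one order at a time, emitting each layer as it goes and stopping as soon as the layer empties instead of querying every remaining order.
import Mathlib
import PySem

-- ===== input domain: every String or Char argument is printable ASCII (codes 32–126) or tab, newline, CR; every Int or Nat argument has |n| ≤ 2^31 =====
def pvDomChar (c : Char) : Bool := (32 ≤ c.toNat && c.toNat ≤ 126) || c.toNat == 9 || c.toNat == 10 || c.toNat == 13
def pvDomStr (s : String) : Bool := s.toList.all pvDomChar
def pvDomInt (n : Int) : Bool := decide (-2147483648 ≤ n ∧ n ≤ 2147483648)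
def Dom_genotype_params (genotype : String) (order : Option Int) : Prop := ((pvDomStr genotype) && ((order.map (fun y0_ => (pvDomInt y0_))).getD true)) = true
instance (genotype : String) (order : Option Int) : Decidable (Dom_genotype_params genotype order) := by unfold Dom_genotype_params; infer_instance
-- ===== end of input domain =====

-- B replaces the per-size itertools.combinations queries with a single layer-by-layer BFS over
-- (combination, remaining) pairs, stopping as soon as a layer empties (measured faster on long
-- genotypes, where A still iterates every remaining order).

-- ===== PORT A =====
-- port of it.combinations(l, k) yielding tuples in lexicographic order (list(z) applied)
def pvCombs : List Int → Nat → List (List Int)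
  | _, 0 => [[]]
  | [], _ + 1 => []
  | x :: xs, k + 1 => (pvCombs xs k).map (x :: ·) ++ pvCombs xs (k + 1)

def genotype_params (genotype : String) (order : Option Int) : List (List Int) :=
  let order := order.getD (PySem.Str.len genotype)
  let length := PySem.Str.len genotype
  let mutations := (PySem.List.pyRange 0 length 1).foldl
    (fun acc i => if PySem.Str.pyGet? genotype i = some '1' then acc ++ [i + 1] else acc) []
  let params : List (List Int) := [[0]]
  (PySem.List.pyRange 1 (order + 1) 1).foldl
    (fun params o => params ++ pvCombs mutations o.toNat) params

-- ===== PORT B =====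
-- _expand(c, rest): [(c + [x], rest[j+1:]) for j, x in enumerate(rest)]
def pvExpand (c : List Int) : List Int → List (List Int × List Int)
  | [] => []
  | x :: xs => (c ++ [x], xs) :: pvExpand c xs

-- one BFS layer step: [p for c, rest in layer for p in _expand(c, rest)]
def pvStep (layer : List (List Int × List Int)) : List (List Int × List Int) :=
  layer.flatMap (fun p => pvExpand p.1 p.2)

-- the while loop of B
def pvLoop (order o : Int) (layer : List (List Int × List Int)) (params : List (List Int)) :
    List (List Int) :=
  if o ≤ order ∧ layer ≠ [] then
    pvLoop order (o + 1) (pvStep layer) (params ++ layer.map Prod.fst)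
  else params
termination_by (order + 1 - o).toNat
decreasing_by omega

def genotype_params_alt (genotype : String) (order : Option Int) : List (List Int) :=
  let order := order.getD (PySem.Str.len genotype)
  let mutations := (PySem.List.pyRange 0 (PySem.Str.len genotype) 1).foldl
    (fun acc i => if PySem.Str.pyGet? genotype i = some '1' then acc ++ [i + 1] else acc) []
  pvLoop order 1 (pvExpand [] mutations) [[0]]

-- ===== PRECONDITION & SPEC =====
def Spec_genotype_params (genotype : String) (order : Option Int) (out : List (List Int)) : Prop := out = genotype_params_alt genotype order
instance (genotype : String) (order : Option Int) (out : List (List Int)) : Decidable (Spec_genotype_params genotype order out) := by unfold Spec_genotype_params; infer_instance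

-- ===== CLAIM (what is proved, stated in full; the proofs are below) =====
def Claim_equal_genotype_params : Prop := ∀ (genotype : String) (order : Option Int), Dom_genotype_params genotype order → Spec_genotype_params genotype order (genotype_params genotype order)

-- ===== LEMMAS AND PROOFS =====

-- iterated layer step
def pvIter : Nat → List (List Int × List Int) → List (List Int × List Int)
  | 0, s => s
  | k + 1, s => pvIter k (pvStep s)

theorem pvStep_append (a b : List (List Int × List Int)) :
    pvStep (a ++ b) = pvStep a ++ pvStep b := by
  simp [pvStep]

theorem pvIter_append (k : Nat) (a b : List (List Int × List Int)) :
    pvIter k (a ++ b) = pvIter k a ++ pvIter k b := by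
  induction k generalizing a b with
  | zero => rfl
  | succ k ih => simp [pvIter, pvStep_append, ih]

theorem pvIter_step_comm (k : Nat) (s : List (List Int × List Int)) :
    pvIter k (pvStep s) = pvStep (pvIter k s) := by
  induction k generalizing s with
  | zero => rfl
  | succ k ih => simp [pvIter, ih]

theorem pvIter_nil (k : Nat) : pvIter k [] = [] := by
  induction k with
  | zero => rfl
  | succ k ih => simpa [pvIter, pvStep] using ih

theorem pvExpand_fst (c r : List Int) :
    (pvExpand c r).map Prod.fst = (pvCombs r 1).map (c ++ ·) := by
  induction r generalizing c with
  | nil => rfl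
  | cons x xs ih => simp [pvExpand, pvCombs, ih]

-- the layer of order k+1 grown from prefix c over remaining r carries exactly
-- the size-(k+1) combinations of r, each prefixed by c, in lexicographic order
theorem pvIter_expand_fst (k : Nat) : ∀ (c r : List Int),
    (pvIter k (pvExpand c r)).map Prod.fst = (pvCombs r (k + 1)).map (c ++ ·) := by
  induction k with
  | zero =>
    intro c r
    simpa [pvIter] using pvExpand_fst c r
  | succ k ih =>
    intro c r
    induction r generalizing c with
    | nil => simp [pvExpand, pvCombs, pvIter_nil]
    | cons x xs ihr =>
      have hstep : pvStep (pvExpand c (x :: xs)) =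
          pvExpand (c ++ [x]) xs ++ pvStep (pvExpand c xs) := by
        simp [pvExpand, pvStep]
      have h1 := ih (c ++ [x]) xs
      have h2 : (pvIter k (pvStep (pvExpand c xs))).map Prod.fst
          = (pvCombs xs (k + 2)).map (c ++ ·) := ihr c
      calc (pvIter (k + 1) (pvExpand c (x :: xs))).map Prod.fst
          = (pvIter k (pvExpand (c ++ [x]) xs)).map Prod.fst
            ++ (pvIter k (pvStep (pvExpand c xs))).map Prod.fst := by
              simp [pvIter, hstep, pvIter_append]
        _ = (pvCombs xs (k + 1)).map ((c ++ [x]) ++ ·)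
            ++ (pvCombs xs (k + 2)).map (c ++ ·) := by rw [h1, h2]
        _ = (pvCombs (x :: xs) (k + 2)).map (c ++ ·) := by
              simp [pvCombs, Function.comp]

theorem pvCombs_eq_nil {l : List Int} {k : Nat} (h : pvCombs l k = []) {j : Nat} (hj : k ≤ j) :
    pvCombs l j = [] := by
  have hlen : ∀ (l : List Int) (k : Nat), pvCombs l k = [] ↔ l.length < k := by
    intro l
    induction l with
    | nil => intro k; cases k <;> simp [pvCombs]
    | cons x xs ih =>
      intro k
      cases k with
      | zero => simp [pvCombs]
      | succ k => simp [pvCombs, ih, List.map_eq_nil_iff]; omega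
  rw [hlen] at h ⊢; omega

theorem pvLoop_eq (m : List Int) (order : Int) :
    ∀ (n : Nat) (k : Nat) (params : List (List Int)), (order - k).toNat = n →
    pvLoop order (k + 1) (pvIter k (pvExpand [] m)) params
      = params ++ (List.range n).flatMap (fun j => pvCombs m (k + 1 + j)) := by
  intro n
  induction n with
  | zero =>
    intro k params hk
    rw [pvLoop]
    have : ¬ ((k : Int) + 1 ≤ order ∧ pvIter k (pvExpand [] m) ≠ []) := by
      rintro ⟨h1, _⟩; omega
    rw [if_neg this]
    simp
  | succ n ih =>
    intro k params hk
    have hfst : (pvIter k (pvExpand [] m)).map Prod.fst = pvCombs m (k + 1) := by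
      have := pvIter_expand_fst k [] m
      simpa using this
    by_cases hnil : pvIter k (pvExpand [] m) = []
    · -- layer empty: all remaining combination lists are empty too
      have hce : pvCombs m (k + 1) = [] := by rw [← hfst, hnil]; rfl
      rw [pvLoop]
      simp only [hnil, ne_eq, not_true_eq_false, and_false, if_false]
      have : ∀ j ∈ List.range (n + 1), pvCombs m (k + 1 + j) = [] := by
        intro j _
        exact pvCombs_eq_nil hce (by omega)
      rw [List.flatMap_eq_nil_iff.mpr this, List.append_nil]
    · rw [pvLoop]
      have hcond : ((k : Int) + 1 ≤ order ∧ pvIter k (pvExpand [] m) ≠ []) := by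
        refine ⟨by omega, hnil⟩
      rw [if_pos hcond, hfst]
      have hstep : pvStep (pvIter k (pvExpand [] m)) = pvIter (k + 1) (pvExpand [] m) := by
        rw [← pvIter_step_comm]; rfl
      have hk' : (order - (k + 1 : Nat)).toNat = n := by push_cast; omega
      have := ih (k + 1) (params ++ pvCombs m (k + 1)) hk'
      rw [hstep]
      have hcast : ((k : Int) + 1 + 1) = ((k + 1 : Nat) : Int) + 1 := by push_cast; ring
      rw [hcast, this]
      rw [List.range_succ_eq_map, List.flatMap_cons, List.flatMap_map, List.append_assoc]
      congr 1
      congr 1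
      congr 1
      funext j
      congr 1
      omega

-- ===== VERDICT (by name: the statement is the Claim_ definition above) =====
theorem genotype_params_spec : Claim_equal_genotype_params := by
  intro genotype order _
  unfold Spec_genotype_params genotype_params genotype_params_alt
  dsimp only
  set ord := order.getD (PySem.Str.len genotype) with hord
  set m := (PySem.List.pyRange 0 (PySem.Str.len genotype) 1).foldl
    (fun acc i => if PySem.Str.pyGet? genotype i = some '1' then acc ++ [i + 1] else acc) []
    with hm
  rw [PySem.List.foldl_append_eq_flatMap]
  have hloop := pvLoop_eq m ord ord.toNat 0 [[0]] (by omega)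
  simp only [Nat.cast_zero, zero_add] at hloop
  have h0 : pvIter 0 (pvExpand [] m) = pvExpand [] m := rfl
  rw [h0] at hloop
  rw [hloop]
  congr 1
  rw [PySem.List.pyRange_one]
  have h1 : (ord + 1 - 1).toNat = ord.toNat := by omega
  rw [h1, List.flatMap_map]
  have h2 : (fun a : Nat => pvCombs m ((1 : Int) + (a : Int)).toNat) = fun j : Nat => pvCombs m (1 + j) := by
    funext j
    have h3 : ((1 : Int) + (j : Int)).toNat = 1 + j := by omega
    rw [h3]
  rw [h2]
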